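-- pv_equiv track=rewrite | github.com/Ejdmmm/PRO-3ro- | homeworkDodatecne.py | sequences
-- ===== SOURCE A (Python) =====
-- def sequences(line_a, line_b, line_c):
--     # prazdny slovnik pro results
--     result = {}
--
--     # cyklem prochazim a zaznamenavam
--     for sequence, label in [(line_a, 'A'), (line_b, 'B'), (line_c, 'C')]:
--         for id, count in sequence:
--             # kdyz neexistuje = prazdny seznam
--             if id not in result:
--                 result[id] = [0, 0, 0]
--             # pridam hodnotu count na misto v seznamu podle label.
--             if label == 'A':
--                 result[id][0] = count;
--             elif label == 'B':
--                 result[id][1] = count;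
--             elif label == 'C':
--                 result[id][2] = count;
--
--     return result
-- ===== SOURCE B (Python) =====
-- def sequences(line_a, line_b, line_c):
--     # Two-phase: build one dict per line (last value wins), then assemble
--     # the ordered key union into the result table.
--     d_a, d_b, d_c = dict(line_a), dict(line_b), dict(line_c)
--     order = list(dict.fromkeys(list(d_a) + list(d_b) + list(d_c)))
--     return {k: [d_a.get(k, 0), d_b.get(k, 0), d_c.get(k, 0)] for k in order}
-- ===== Notes on version B (the rewrite author's own statement) =====
-- stated objective: simpler
-- what changed: Replaces A's single interleaved pass with label dispatch and in-place slot mutation by two phases: build one dict per input line (last value wins), then assemble the ordered union of keys into triples via lookups with default 0.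
import Mathlib
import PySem

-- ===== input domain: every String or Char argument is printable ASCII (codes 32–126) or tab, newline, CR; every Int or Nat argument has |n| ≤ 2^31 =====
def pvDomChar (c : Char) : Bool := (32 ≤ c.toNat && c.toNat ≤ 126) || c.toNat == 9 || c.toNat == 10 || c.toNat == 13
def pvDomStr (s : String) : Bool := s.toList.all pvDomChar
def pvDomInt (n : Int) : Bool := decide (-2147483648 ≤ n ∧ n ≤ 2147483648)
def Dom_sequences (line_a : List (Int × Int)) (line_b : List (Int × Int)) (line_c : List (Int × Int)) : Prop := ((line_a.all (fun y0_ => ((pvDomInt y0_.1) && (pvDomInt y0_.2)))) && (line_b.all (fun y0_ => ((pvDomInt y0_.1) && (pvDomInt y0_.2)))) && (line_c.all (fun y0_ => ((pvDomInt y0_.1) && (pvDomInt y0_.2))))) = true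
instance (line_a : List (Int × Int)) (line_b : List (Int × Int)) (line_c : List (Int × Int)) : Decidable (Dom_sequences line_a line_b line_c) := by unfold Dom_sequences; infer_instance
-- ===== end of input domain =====

-- B replaces A's single interleaved label-dispatching pass by a two-phase plan:
-- build one dict per line, then assemble the ordered key union (objective: simpler).

-- ===== PORT A =====
def sequences (line_a : List (Int × Int)) (line_b : List (Int × Int)) (line_c : List (Int × Int)) : List (Int × List Int) :=
  (([(line_a, "A"), (line_b, "B"), (line_c, "C")] : List (List (Int × Int) × String)).foldl
    (fun result sl =>
      sl.1.foldl (fun result p =>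
        -- if id not in result: result[id] = [0, 0, 0]
        let r := if result.contains p.1 then result else result.insert p.1 ([0, 0, 0] : List Int)
        -- result[id][slot] = count  (dict entry updated with the mutated list)
        if sl.2 = "A" then r.insert p.1 ((r.getD p.1 [0, 0, 0]).set 0 p.2)
        else if sl.2 = "B" then r.insert p.1 ((r.getD p.1 [0, 0, 0]).set 1 p.2)
        else if sl.2 = "C" then r.insert p.1 ((r.getD p.1 [0, 0, 0]).set 2 p.2)
        else r) result)
    PySem.Dict.empty).items

-- ===== PORT B =====
def sequences_alt (line_a : List (Int × Int)) (line_b : List (Int × Int)) (line_c : List (Int × Int)) : List (Int × List Int) :=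
  let dA := PySem.Dict.ofList line_a
  let dB := PySem.Dict.ofList line_b
  let dC := PySem.Dict.ofList line_c
  let order := PySem.List.dedup (dA.keys ++ dB.keys ++ dC.keys)
  order.map (fun k => (k, ([dA.getD k 0, dB.getD k 0, dC.getD k 0] : List Int)))

-- ===== PRECONDITION & SPEC =====
def Spec_sequences (line_a : List (Int × Int)) (line_b : List (Int × Int)) (line_c : List (Int × Int)) (out : List (Int × List Int)) : Prop := out = sequences_alt line_a line_b line_c
instance (line_a : List (Int × Int)) (line_b : List (Int × Int)) (line_c : List (Int × Int)) (out : List (Int × List Int)) : Decidable (Spec_sequences line_a line_b line_c out) := by unfold Spec_sequences; infer_instance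

-- ===== CLAIM (what is proved, stated in full; the proofs are below) =====
def Claim_equal_sequences : Prop := ∀ (line_a : List (Int × Int)) (line_b : List (Int × Int)) (line_c : List (Int × Int)), Dom_sequences line_a line_b line_c → Spec_sequences line_a line_b line_c (sequences line_a line_b line_c)

-- ===== LEMMAS AND PROOFS =====

-- One step of A's inner loop, specialised to slot i.
def pvStep (i : Nat) (d : PySem.Dict Int (List Int)) (p : Int × Int) : PySem.Dict Int (List Int) :=
  let r := if d.contains p.1 then d else d.insert p.1 ([0, 0, 0] : List Int)
  r.insert p.1 ((r.getD p.1 [0, 0, 0]).set i p.2)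

theorem pv_seq_eq (a b c : List (Int × Int)) :
    sequences a b c =
      (c.foldl (pvStep 2) (b.foldl (pvStep 1) (a.foldl (pvStep 0) PySem.Dict.empty))).items := rfl

theorem pvStep_get? (i : Nat) (d : PySem.Dict Int (List Int)) (x : Int × Int) (k : Int) :
    (pvStep i d x).get? k =
      if k = x.1 then some ((d.getD x.1 [0, 0, 0]).set i x.2) else d.get? k := by
  unfold pvStep
  by_cases hc : d.contains x.1 = true
  · simp only [hc, if_true]
    simp [PySem.Dict.get?_insert]
  · simp only [hc]
    by_cases hk : k = x.1
    · subst hk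
      simp [PySem.Dict.getD_of_not_contains (h := by simpa using hc)]
    · simp [PySem.Dict.get?_insert, hk]

theorem pvStep_getD (i : Nat) (d : PySem.Dict Int (List Int)) (x : Int × Int) (k : Int) :
    (pvStep i d x).getD k [0, 0, 0] =
      if k = x.1 then (d.getD x.1 [0, 0, 0]).set i x.2 else d.getD k [0, 0, 0] := by
  rw [PySem.Dict.getD_eq_get?_getD, pvStep_get?]
  by_cases hk : k = x.1 <;> simp [hk, PySem.Dict.getD_eq_get?_getD]

theorem pv_ofList_get? (s : List (Int × Int)) (d : PySem.Dict Int Int) (k : Int) :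
    (s.foldl (fun d p => d.insert p.1 p.2) d).get? k =
      if k ∈ s.map Prod.fst then (PySem.Dict.ofList s).get? k else d.get? k := by
  induction s generalizing d with
  | nil => simp
  | cons x t ih =>
    have hofl : (PySem.Dict.ofList (x :: t)).get? k =
        if k ∈ t.map Prod.fst then (PySem.Dict.ofList t).get? k
        else (PySem.Dict.empty.insert x.1 x.2).get? k := by
      show ((x :: t).foldl (fun d p => d.insert p.1 p.2) PySem.Dict.empty).get? k = _
      rw [List.foldl_cons, ih]
    rw [List.foldl_cons, ih]
    by_cases ht : k ∈ t.map Prod.fst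
    · simp [ht, hofl]
    · by_cases hx : k = x.1
      · subst hx
        simp [ht, hofl, PySem.Dict.get?_insert_self]
      · simp [ht, hx, PySem.Dict.get?_insert]

theorem pv_ofList_getD_zero (s : List (Int × Int)) (k : Int) (h : k ∉ s.map Prod.fst) :
    (PySem.Dict.ofList s).getD k 0 = 0 := by
  have := pv_ofList_get? s PySem.Dict.empty k
  rw [PySem.Dict.getD_eq_get?_getD]
  simp only [h, if_false] at this
  rw [show (PySem.Dict.ofList s) = (s.foldl (fun d p => d.insert p.1 p.2) PySem.Dict.empty) from rfl,
    this]
  simp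

theorem pv_pass_get? (i : Nat) (s : List (Int × Int)) (d : PySem.Dict Int (List Int)) (k : Int) :
    (s.foldl (pvStep i) d).get? k =
      if k ∈ s.map Prod.fst then
        some ((d.getD k [0, 0, 0]).set i ((PySem.Dict.ofList s).getD k 0))
      else d.get? k := by
  induction s generalizing d with
  | nil => simp
  | cons x t ih =>
    have hofl : (PySem.Dict.ofList ((x :: t) : List (Int × Int))).getD k 0 =
        if k ∈ t.map Prod.fst then (PySem.Dict.ofList t).getD k 0
        else (PySem.Dict.empty.insert x.1 x.2).getD k 0 := by
      rw [PySem.Dict.getD_eq_get?_getD]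
      rw [show (PySem.Dict.ofList ((x :: t) : List (Int × Int))) =
        ((x :: t).foldl (fun d p => d.insert p.1 p.2) PySem.Dict.empty) from rfl]
      rw [List.foldl_cons, pv_ofList_get?]
      by_cases ht : k ∈ t.map Prod.fst <;>
        simp [ht, PySem.Dict.getD_eq_get?_getD]
    rw [List.foldl_cons, ih]
    by_cases ht : k ∈ t.map Prod.fst
    · simp only [ht, if_true, List.map_cons, List.mem_cons, or_true, pvStep_getD, hofl]
      by_cases hx : k = x.1
      · subst hx; simp [List.set_set]
      · simp [hx]
    · by_cases hx : k = x.1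
      · subst hx
        simp [ht, pvStep_get?, hofl, PySem.Dict.getD_insert_self]
      · simp [ht, hx, pvStep_get?]

theorem pv_pass_getD (i : Nat) (s : List (Int × Int)) (d : PySem.Dict Int (List Int)) (k : Int) :
    (s.foldl (pvStep i) d).getD k [0, 0, 0] =
      if k ∈ s.map Prod.fst then
        (d.getD k [0, 0, 0]).set i ((PySem.Dict.ofList s).getD k 0)
      else d.getD k [0, 0, 0] := by
  rw [PySem.Dict.getD_eq_get?_getD, pv_pass_get?]
  by_cases h : k ∈ s.map Prod.fst <;> simp [h, PySem.Dict.getD_eq_get?_getD]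

theorem pvStep_keys (i : Nat) (d : PySem.Dict Int (List Int)) (x : Int × Int) :
    (pvStep i d x).keys = PySem.Set.add d.keys x.1 := by
  unfold pvStep
  by_cases hc : d.contains x.1 = true
  · have hmem : x.1 ∈ d.keys := (PySem.Dict.contains_iff_mem_keys _ _).1 hc
    simp only [hc, if_true]
    rw [PySem.Dict.keys_insert_of_contains (h := hc), PySem.Set.add_of_mem hmem]
  · have hmem : x.1 ∉ d.keys := fun h => hc ((PySem.Dict.contains_iff_mem_keys _ _).2 h)
    rw [if_neg (by simp [hc])]
    rw [PySem.Dict.keys_insert_of_contains (h := PySem.Dict.contains_insert_self _ _ _),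
      PySem.Dict.keys_insert_of_not_contains (h := by simpa using hc),
      PySem.Set.add_of_not_mem hmem]

theorem pvStep_nodup (i : Nat) (d : PySem.Dict Int (List Int)) (x : Int × Int)
    (h : d.keys.Nodup) : (pvStep i d x).keys.Nodup := by
  unfold pvStep
  by_cases hc : d.contains x.1 = true <;>
    simp only [hc, if_true] <;>
    exact PySem.Dict.nodup_keys_insert _ _ _ (by first | exact h | exact PySem.Dict.nodup_keys_insert _ _ _ h)

theorem pv_pass_keys (i : Nat) (s : List (Int × Int)) (d : PySem.Dict Int (List Int)) :
    (s.foldl (pvStep i) d).keys = PySem.Set.update d.keys (s.map Prod.fst) := by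
  induction s generalizing d with
  | nil => simp [PySem.Set.update]
  | cons x t ih =>
    rw [List.foldl_cons, ih, List.map_cons, PySem.Set.update_cons, pvStep_keys]

theorem pv_pass_nodup (i : Nat) (s : List (Int × Int)) (d : PySem.Dict Int (List Int))
    (h : d.keys.Nodup) : (s.foldl (pvStep i) d).keys.Nodup := by
  induction s generalizing d with
  | nil => simpa
  | cons x t ih => exact ih _ (pvStep_nodup _ _ _ h)

theorem pv_update_ofList {α : Type} [DecidableEq α] (s : List α) (xs : List α) :
    PySem.Set.update s (PySem.Set.ofList xs) = PySem.Set.update s xs := by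
  rw [PySem.Set.update_eq_append_filter, PySem.Set.update_eq_append_filter,
    PySem.Set.ofList_ofList]

theorem pv_dict_keys_ofList (s : List (Int × Int)) :
    (PySem.Dict.ofList s).keys = PySem.Set.ofList (s.map Prod.fst) := by
  rw [show (PySem.Dict.ofList s) = (s.foldl (fun d p => d.insert p.1 p.2) PySem.Dict.empty) from rfl,
    PySem.Dict.keys_foldl_insert_key s Prod.fst (fun d p => p.2) PySem.Dict.empty,
    PySem.Dict.keys_empty, PySem.Set.update_nil_left]

theorem pv_val (a b c : List (Int × Int)) (k : Int) :
    (c.foldl (pvStep 2) (b.foldl (pvStep 1) (a.foldl (pvStep 0) PySem.Dict.empty))).getD k [0, 0, 0] =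
      [(PySem.Dict.ofList a).getD k 0, (PySem.Dict.ofList b).getD k 0, (PySem.Dict.ofList c).getD k 0] := by
  rw [pv_pass_getD, pv_pass_getD, pv_pass_getD]
  by_cases ha : k ∈ a.map Prod.fst <;>
    by_cases hb : k ∈ b.map Prod.fst <;>
      by_cases hc : k ∈ c.map Prod.fst <;>
        simp [ha, hb, hc, PySem.Dict.getD_empty,
          pv_ofList_getD_zero a k, pv_ofList_getD_zero b k, pv_ofList_getD_zero c k,
          List.set]

-- ===== VERDICT (by name: the statement is the Claim_ definition above) =====
theorem sequences_spec : Claim_equal_sequences := by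
  intro a b c _
  unfold Spec_sequences
  rw [pv_seq_eq]
  set final := (c.foldl (pvStep 2) (b.foldl (pvStep 1) (a.foldl (pvStep 0) PySem.Dict.empty))) with hfinal
  have hnd : final.keys.Nodup := by
    apply pv_pass_nodup; apply pv_pass_nodup; apply pv_pass_nodup
    exact PySem.Dict.nodup_keys_empty
  rw [PySem.Dict.items_eq_map_keys final hnd ([0, 0, 0] : List Int)]
  have hkeys : final.keys =
      PySem.List.dedup ((PySem.Dict.ofList a).keys ++ (PySem.Dict.ofList b).keys ++ (PySem.Dict.ofList c).keys) := by
    rw [hfinal, pv_pass_keys, pv_pass_keys, pv_pass_keys, PySem.Dict.keys_empty,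
      PySem.Set.update_nil_left]
    rw [PySem.List.dedup_eq_ofList, pv_dict_keys_ofList, pv_dict_keys_ofList, pv_dict_keys_ofList]
    rw [List.append_assoc, PySem.Set.ofList_append, PySem.Set.ofList_ofList,
      PySem.Set.update_append, pv_update_ofList, pv_update_ofList]
  unfold sequences_alt
  simp only []
  rw [hkeys]
  apply List.map_congr_left
  intro k _
  rw [hfinal, pv_val]
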